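-- pv_equiv track=rewrite | github.com/wan0911/algorithm-study | etc/programmers/lv0/배열 조각하기/배열조각하기.py | solution
-- ===== SOURCE A (Python) =====
-- def solution(arr, query):
--     answer = []
--
--     # query 길이만큼 반복
--     ## 1. q = 짝수 or 홀수
--     ## list 길이 변화 -> copy X
--     ## 2. q -> slicing... pop? / 재할당
--     ## 3. 예외: 배열 재할당 -> idx 문제?
--     ### slicing - 범위 문제 X
--     ### 인덱스 의미를 잘못 해석
--
--     for i in range(len(query)):
--         q = query[i]
--         if i % 2 == 0:
--             arr = arr[:q+1]
--
--         else:
--             arr = arr[q:]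
--
--     return arr
-- ===== SOURCE B (Python) =====
-- def solution(arr, query):
--     # Track the window [lo, hi) through the queries; slice the array once at the end.
--     lo, hi = 0, len(arr)
--     for i, q in enumerate(query):
--         m = hi - lo
--         s = q + 1 if i % 2 == 0 else q
--         if s < 0:
--             s += m
--         if s < 0:
--             s = 0
--         elif s > m:
--             s = m
--         if i % 2 == 0:
--             hi = lo + s
--         else:
--             lo = lo + s
--     return arr[lo:hi]
-- ===== Notes on version B (the rewrite author's own statement) =====
-- stated objective: alternative
-- what changed: Instead of materialising a new list slice for every query, B tracks the window's left/right indices through all queries (with Python's slice-clamping arithmetic) and slices the array once at the end.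
import Mathlib
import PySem

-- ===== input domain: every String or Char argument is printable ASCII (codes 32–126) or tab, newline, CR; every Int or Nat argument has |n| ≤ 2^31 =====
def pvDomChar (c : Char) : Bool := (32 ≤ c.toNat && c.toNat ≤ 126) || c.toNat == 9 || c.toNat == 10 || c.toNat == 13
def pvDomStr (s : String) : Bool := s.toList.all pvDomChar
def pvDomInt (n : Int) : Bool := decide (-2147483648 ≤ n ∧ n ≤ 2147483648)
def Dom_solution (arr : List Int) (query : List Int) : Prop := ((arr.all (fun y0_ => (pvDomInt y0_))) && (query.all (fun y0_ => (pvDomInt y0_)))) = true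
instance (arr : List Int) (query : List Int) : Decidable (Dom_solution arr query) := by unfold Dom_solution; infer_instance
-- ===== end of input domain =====

-- B replaces A's per-query re-slicing by tracking window indices and slicing once at the end.

-- ===== PORT A =====
-- one loop iteration: even i takes arr[:q+1], odd i takes arr[q:]
def solutionStepA (a : List Int) (iq : Int × Int) : List Int :=
  if iq.1 % 2 == 0 then PySem.List.slice a none (some (iq.2 + 1))
  else PySem.List.slice a (some iq.2) none

def solution (arr : List Int) (query : List Int) : List Int :=
  (PySem.List.enumerate query).foldl solutionStepA arr

-- ===== PORT B =====
-- one loop iteration of Source B: update (lo, hi) with Python's slice-clamping arithmetic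
def solutionStepB (st : Nat × Nat) (iq : Int × Int) : Nat × Nat :=
  let m : Int := (st.2 : Int) - (st.1 : Int)
  let s0 : Int := if iq.1 % 2 == 0 then iq.2 + 1 else iq.2
  let s1 : Int := if s0 < 0 then s0 + m else s0
  let s : Nat := if s1 < 0 then 0 else if s1 > m then m.toNat else s1.toNat
  if iq.1 % 2 == 0 then (st.1, st.1 + s) else (st.1 + s, st.2)

def solution_alt (arr : List Int) (query : List Int) : List Int :=
  let st := (PySem.List.enumerate query).foldl solutionStepB (0, arr.length)
  (arr.drop st.1).take (st.2 - st.1)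

-- ===== PRECONDITION & SPEC =====
def Spec_solution (arr : List Int) (query : List Int) (out : List Int) : Prop := out = solution_alt arr query
instance (arr : List Int) (query : List Int) (out : List Int) : Decidable (Spec_solution arr query out) := by unfold Spec_solution; infer_instance

-- ===== CLAIM (what is proved, stated in full; the proofs are below) =====
def Claim_equal_solution : Prop := ∀ (arr : List Int) (query : List Int), Dom_solution arr query → Spec_solution arr query (solution arr query)

-- ===== LEMMAS AND PROOFS =====

-- Python's xs[:b] as take with clamped bound
theorem slice_none_some_eq (xs : List Int) (b : Int) :
    PySem.List.slice xs none (some b) = xs.take (PySem.List.clampIdx xs.length b) := by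
  simp [PySem.List.slice, PySem.List.clampIdx]

-- the clamped length computed by B's step equals Python's slice clamp on the window length
theorem stepB_clamp (lo hi : Nat) (b : Int) (hlohi : lo ≤ hi) :
    PySem.List.clampIdx (hi - lo) b =
      (let m : Int := (hi : Int) - (lo : Int)
       let s1 : Int := if b < 0 then b + m else b
       if s1 < 0 then 0 else if s1 > m then m.toNat else s1.toNat) := by
  simp only [PySem.List.clampIdx]
  split_ifs <;> omega

theorem stepB_le (lo hi : Nat) (b : Int) (hlohi : lo ≤ hi) :
    (let m : Int := (hi : Int) - (lo : Int)
     let s1 : Int := if b < 0 then b + m else b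
     if s1 < 0 then 0 else if s1 > m then m.toNat else s1.toNat) ≤ hi - lo := by
  simp only
  split_ifs <;> omega

-- loop invariant: folding A's step over a slice-window equals folding B's index pair
theorem foldl_inv (l : List (Int × Int)) :
    ∀ (arr0 : List Int) (lo hi : Nat), lo ≤ hi → hi ≤ arr0.length →
      l.foldl solutionStepA ((arr0.drop lo).take (hi - lo)) =
        (fun st : Nat × Nat => (arr0.drop st.1).take (st.2 - st.1))
          (l.foldl solutionStepB (lo, hi)) := by
  induction l with
  | nil => intro arr0 lo hi _ _; rfl
  | cons p t ih =>
    intro arr0 lo hi hlohi hhi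
    obtain ⟨i, q⟩ := p
    have hlenX : ((arr0.drop lo).take (hi - lo)).length = hi - lo := by
      simp [List.length_take, List.length_drop]; omega
    by_cases hpar : i % 2 == 0
    · -- even: take q+1
      set s : Nat := (let m : Int := (hi : Int) - (lo : Int)
        let s1 : Int := if q + 1 < 0 then q + 1 + m else q + 1
        if s1 < 0 then 0 else if s1 > m then m.toNat else s1.toNat) with hs
      have hsle : s ≤ hi - lo := stepB_le lo hi (q + 1) hlohi
      have hA : solutionStepA ((arr0.drop lo).take (hi - lo)) (i, q) =
          (arr0.drop lo).take ((lo + s) - lo) := by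
        simp only [solutionStepA, hpar, if_true]
        rw [slice_none_some_eq, hlenX, stepB_clamp lo hi (q + 1) hlohi, ← hs,
            List.take_take]
        congr 1
        omega
      have hB : solutionStepB (lo, hi) (i, q) = (lo, lo + s) := by
        simp only [solutionStepB, hpar, if_true]
        rw [← hs]
      simp only [List.foldl_cons, hA, hB]
      exact ih arr0 lo (lo + s) (by omega) (by omega)
    · -- odd: drop q
      set s : Nat := (let m : Int := (hi : Int) - (lo : Int)
        let s1 : Int := if q < 0 then q + m else q
        if s1 < 0 then 0 else if s1 > m then m.toNat else s1.toNat) with hs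
      have hsle : s ≤ hi - lo := stepB_le lo hi q hlohi
      have hA : solutionStepA ((arr0.drop lo).take (hi - lo)) (i, q) =
          (arr0.drop (lo + s)).take (hi - (lo + s)) := by
        simp only [solutionStepA, hpar, Bool.false_eq_true, if_false]
        rw [PySem.List.slice_some_none, hlenX, stepB_clamp lo hi q hlohi, ← hs,
            List.drop_take, List.drop_drop]
        congr 1
        omega
      have hB : solutionStepB (lo, hi) (i, q) = (lo + s, hi) := by
        simp only [solutionStepB, hpar, Bool.false_eq_true, if_false]
        rw [← hs]
      simp only [List.foldl_cons, hA, hB]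
      exact ih arr0 (lo + s) hi (by omega) hhi

-- ===== VERDICT (by name: the statement is the Claim_ definition above) =====
theorem solution_spec : Claim_equal_solution := by
  intro arr query _
  unfold Spec_solution solution solution_alt
  have h := foldl_inv (PySem.List.enumerate query) arr 0 arr.length (Nat.zero_le _) le_rfl
  simpa using h
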